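-- pv_equiv track=rewrite | github.com/bizaahil/TIP102 | week2/sesh1/8.PopularSongPairs.py | num_popular_pairs
-- ===== SOURCE A (Python) =====
-- def num_popular_pairs(popularity_scores):
--     total_scores = 0
--     scores = {}
--
--     for score in popularity_scores:
--         if score not in scores:
--             scores[score] = 1
--         else:
--             scores[score] += 1
--
--
--     for score in scores.values():
--         total_scores += score*(score-1)//2
--
--     return total_scores
-- ===== SOURCE B (Python) =====
-- def num_popular_pairs(popularity_scores):
--     total = 0
--     seen = {}
--     for score in popularity_scores:
--         total += seen.get(score, 0)
--         seen[score] = seen.get(score, 0) + 1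
--     return total
-- ===== Notes on version B (the rewrite author's own statement) =====
-- stated objective: simpler
-- what changed: Replaced A's two phases (build a frequency dict, then sum count*(count-1)//2 over its values) with a single pass that adds the number of previously seen equal scores at each element, so no combinatorial formula and no second loop.
import Mathlib
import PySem

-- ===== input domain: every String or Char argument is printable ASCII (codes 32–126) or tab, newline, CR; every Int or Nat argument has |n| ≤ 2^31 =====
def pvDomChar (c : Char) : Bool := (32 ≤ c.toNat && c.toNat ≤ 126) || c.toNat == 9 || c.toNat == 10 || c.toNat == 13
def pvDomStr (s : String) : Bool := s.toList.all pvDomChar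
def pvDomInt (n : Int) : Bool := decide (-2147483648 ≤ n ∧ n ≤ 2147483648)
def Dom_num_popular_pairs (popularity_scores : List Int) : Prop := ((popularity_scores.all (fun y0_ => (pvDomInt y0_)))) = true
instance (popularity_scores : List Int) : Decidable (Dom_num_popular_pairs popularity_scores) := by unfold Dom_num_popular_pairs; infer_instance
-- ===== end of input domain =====

-- B replaces A's two-phase count (frequency dict, then sum count*(count-1)//2) with one pass that
-- adds, at each score, the number of equal scores already seen — objective: simpler.

-- ===== PORT A =====
-- first loop builds the frequency dict; 'scores[score] += 1' on the else branch (key present) is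
-- exactly 'modify score 0 (· + 1)'; second loop sums score*(score-1)//2 over the values
def num_popular_pairs (popularity_scores : List Int) : Int :=
  ((popularity_scores.foldl
      (fun d score =>
        if d.contains score = false then d.insert score 1
        else d.modify score 0 (· + 1))
      (PySem.Dict.empty : PySem.Dict Int Int)).values).foldl (fun total v => total + PySem.Int.floordiv (v * (v - 1)) 2) 0

-- ===== PORT B =====
def num_popular_pairs_alt (popularity_scores : List Int) : Int :=
  (popularity_scores.foldl
    (fun acc score => (acc.1 + acc.2.getD score 0, acc.2.insert score (acc.2.getD score 0 + 1)))
    ((0 : Int), (PySem.Dict.empty : PySem.Dict Int Int))).1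

-- ===== PRECONDITION & SPEC =====
def Spec_num_popular_pairs (popularity_scores : List Int) (out : Int) : Prop := out = num_popular_pairs_alt popularity_scores
instance (popularity_scores : List Int) (out : Int) : Decidable (Spec_num_popular_pairs popularity_scores out) := by unfold Spec_num_popular_pairs; infer_instance

-- ===== CLAIM (what is proved, stated in full; the proofs are below) =====
def Claim_equal_num_popular_pairs : Prop := ∀ (popularity_scores : List Int), Dom_num_popular_pairs popularity_scores → Spec_num_popular_pairs popularity_scores (num_popular_pairs popularity_scores)

-- ===== LEMMAS AND PROOFS =====

def pvTri (v : Int) : Int := PySem.Int.floordiv (v * (v - 1)) 2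

lemma pvTri_succ (v : Int) : pvTri (v + 1) = pvTri v + v := by
  unfold pvTri
  rw [PySem.Int.floordiv_eq_ediv_of_pos (by omega), PySem.Int.floordiv_eq_ediv_of_pos (by omega)]
  have h : (v + 1) * (v + 1 - 1) = v * (v - 1) + 2 * v := by ring
  rw [h]
  omega

def pvSumT (d : PySem.Dict Int Int) : Int := (d.values.map pvTri).sum

lemma pv_sum_map_point (l : List Int) (f g : Int → Int) (s : Int)
    (hnd : l.Nodup) (hs : s ∈ l) (hoff : ∀ k, k ≠ s → g k = f k) :
    (l.map g).sum = (l.map f).sum + (g s - f s) := by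
  induction l with
  | nil => cases hs
  | cons a t ih =>
    rcases List.mem_cons.mp hs with h | h
    · subst h
      have ht : ∀ k ∈ t, g k = f k := by
        intro k hk
        exact hoff k (fun he => (List.nodup_cons.mp hnd).1 (he ▸ hk))
      simp [List.map_congr_left ht]
      ring
    · have ha : g a = f a := by
        refine hoff a (fun he => ?_)
        exact (List.nodup_cons.mp hnd).1 (he ▸ h)
      simp only [List.map_cons, List.sum_cons, ha,
        ih (List.nodup_cons.mp hnd).2 h]
      ring

lemma pvSumT_bump (d : PySem.Dict Int Int) (hnd : d.keys.Nodup) (x : Int) :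
    pvSumT (d.insert x (d.getD x 0 + 1)) = pvSumT d + d.getD x 0 := by
  by_cases h : d.contains x = true
  · have hmem : x ∈ d.keys := (PySem.Dict.contains_iff_mem_keys d x).mp h
    have hkeys : (d.insert x (d.getD x 0 + 1)).keys = d.keys :=
      PySem.Dict.keys_insert_of_contains d _ h
    have hnd' : (d.insert x (d.getD x 0 + 1)).keys.Nodup := hkeys ▸ hnd
    unfold pvSumT
    rw [PySem.Dict.values_eq_map_keys _ hnd' 0, PySem.Dict.values_eq_map_keys d hnd 0,
      hkeys, List.map_map, List.map_map]
    have := pv_sum_map_point d.keys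
      (fun k => pvTri (d.getD k 0))
      (fun k => pvTri ((d.insert x (d.getD x 0 + 1)).getD k 0)) x hnd hmem
      (by
        intro k hk
        simp [PySem.Dict.getD_insert, hk])
    simp only [Function.comp_def]
    rw [this]
    simp [pvTri_succ]
  · have h' : d.contains x = false := by simpa using h
    have hget : d.getD x 0 = 0 := PySem.Dict.getD_of_not_contains d 0 h'
    unfold pvSumT
    rw [hget]
    have hitems := PySem.Dict.items_insert_of_not_contains d (0 + 1 : Int) h'
    simp only [PySem.Dict.values, hitems]
    simp [pvTri, PySem.Int.floordiv]

lemma pv_afold_eq_counter (ps : List Int) :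
    ps.foldl
      (fun d score =>
        if d.contains score = false then d.insert score 1
        else d.modify score 0 (· + 1))
      PySem.Dict.empty = PySem.Dict.counter ps := by
  rw [PySem.Dict.counter_eq_foldl]
  apply PySem.List.foldl_congr_mem
  intro d s _
  by_cases h : d.contains s = true
  · simp [h]
  · have h' : d.contains s = false := by simpa using h
    simp [h', PySem.Dict.modify, PySem.Dict.getD_of_not_contains d 0 h']

lemma pv_bfold (ps : List Int) :
    ps.foldl
      (fun acc score => (acc.1 + acc.2.getD score 0, acc.2.insert score (acc.2.getD score 0 + 1)))
      ((0 : Int), (PySem.Dict.empty : PySem.Dict Int Int))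
    = (pvSumT (PySem.Dict.counter ps), PySem.Dict.counter ps) := by
  induction ps using List.reverseRecOn with
  | nil => rfl
  | append_singleton t x ih =>
    rw [List.foldl_append, ih]
    have hc : PySem.Dict.counter (t ++ [x])
        = (PySem.Dict.counter t).insert x ((PySem.Dict.counter t).getD x 0 + 1) := by
      rw [PySem.Dict.counter_append_singleton]
      rfl
    simp only [List.foldl_cons, List.foldl_nil, hc]
    rw [pvSumT_bump _ (PySem.Dict.nodup_keys_counter t) x]

-- ===== VERDICT (by name: the statement is the Claim_ definition above) =====
theorem num_popular_pairs_spec : Claim_equal_num_popular_pairs := by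
  intro ps _
  show num_popular_pairs ps = num_popular_pairs_alt ps
  unfold num_popular_pairs num_popular_pairs_alt
  rw [pv_afold_eq_counter, pv_bfold]
  rw [PySem.List.foldl_add (g := fun v => PySem.Int.floordiv (v * (v - 1)) 2)]
  simp only [pvSumT]
  rw [List.map_congr_left
    (fun v _ => rfl : ∀ v ∈ (PySem.Dict.counter ps).values, PySem.Int.floordiv (v * (v - 1)) 2 = pvTri v)]
  exact zero_add _
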